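-- pv_equiv track=rewrite | github.com/edt-yxz-zzd/python3_src | nn_ns/math_nn/uint_map.py | floor_log
-- ===== SOURCE A (Python) =====
-- def floor_log(u,B):
--     "return e if B**e <= u < B**(e+1), B > 1, u >= 1"
--
--     assert( B > 1)
--     assert( u >= 1)
--
--     pow_B_2_i = [] #pow_w_2_i[i] == B**(2**i)
--     pow_B = B # == B**(2**0) == B**(2**len(pow_B_2_i))
--     while( pow_B <= u):
--         pow_B_2_i.append( pow_B)
--         pow_B *= pow_B # == B**(2**len(pow_B_2_i))
--
--     assert( u < pow_B == B**(2**len(pow_B_2_i)) )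
--
--     power = 0
--     q = u
--     for i in range( len(pow_B_2_i)-1, 0-1, -1):
--         if q >= pow_B_2_i[i]:
--             q //= pow_B_2_i[i]
--             power += 2**i
--
--     assert( B**power <= u < B**(power+1) )
--     return power
-- ===== SOURCE B (Python) =====
-- def floor_log(u,B):
--     "return e if B**e <= u < B**(e+1), B > 1, u >= 1"
--     assert( B > 1)
--     assert( u >= 1)
--     e = 0
--     p = B  # p == B**(e+1)
--     while p <= u:
--         p *= B
--         e += 1
--     return e
-- ===== Notes on version B (the rewrite author's own statement) =====
-- stated objective: simpler
-- what changed: Replaces A's two-phase repeated-squaring table plus binary-exponent descent with a single linear scan that multiplies by B once per exponent step.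
import Mathlib
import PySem

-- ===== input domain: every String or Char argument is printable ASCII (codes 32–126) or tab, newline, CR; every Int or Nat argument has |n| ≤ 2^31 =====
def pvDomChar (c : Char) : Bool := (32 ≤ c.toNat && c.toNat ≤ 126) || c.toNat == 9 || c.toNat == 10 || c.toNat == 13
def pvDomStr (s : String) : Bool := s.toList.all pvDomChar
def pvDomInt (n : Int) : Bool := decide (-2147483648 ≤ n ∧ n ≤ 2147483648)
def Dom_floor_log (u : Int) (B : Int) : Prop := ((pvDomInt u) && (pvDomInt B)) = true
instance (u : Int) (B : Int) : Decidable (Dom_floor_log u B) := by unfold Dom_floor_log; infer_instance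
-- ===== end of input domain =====

-- B replaces A's repeated-squaring table + binary-exponent descent by a plain linear
-- scan over exponents (simpler, not faster); equal on all B > 1, u >= 1.


-- ===== PORT A =====
-- the 'while pow_B <= u' table-building loop; the extra '2 ≤ pB' conjunct only makes
-- the recursion total (it holds invariantly on every admitted input)
def aGrow (u : Int) (pB : Int) (acc : List Int) : List Int × Int :=
  if h : 2 ≤ pB ∧ pB ≤ u then aGrow u (pB * pB) (acc ++ [pB]) else (acc, pB)
termination_by (u + 1 - pB).toNat
decreasing_by
  have : pB + pB ≤ pB * pB := by nlinarith [h.1]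
  omega

-- body of 'for i in range(len(L)-1, -1, -1)';  L[i] is pyGetD (i always in range),
-- 2**i is 2 ^ i.toNat (i ≥ 0 on every reached index)
def aStep (L : List Int) (pq : Int × Int) (i : Int) : Int × Int :=
  if PySem.List.pyGetD L i 0 ≤ pq.2 then
    (pq.1 + 2 ^ i.toNat, PySem.Int.floordiv pq.2 (PySem.List.pyGetD L i 0))
  else pq

def floor_log (u : Int) (B : Int) : Int :=
  if 1 < B then
    if 1 ≤ u then
      let r := aGrow u B []
      ((PySem.List.pyRange ((r.1.length : Int) - 1) (-1) (-1)).foldl (aStep r.1) (0, u)).1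
    else 0  -- Python: assert(u >= 1) raises; excluded by Pre_
  else 0    -- Python: assert(B > 1) raises; excluded by Pre_

-- ===== PORT B =====
-- the 'while p <= u' linear scan; the extra conjuncts only make the recursion total
def bLoop (u : Int) (B : Int) (e : Int) (p : Int) : Int :=
  if h : 2 ≤ B ∧ 1 ≤ p ∧ p ≤ u then bLoop u B (e + 1) (p * B) else e
termination_by (u + 1 - p).toNat
decreasing_by
  have : p + p ≤ p * B := by nlinarith [h.1, h.2.1]
  omega

def floor_log_alt (u : Int) (B : Int) : Int :=
  if 1 < B then
    if 1 ≤ u then bLoop u B 0 B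
    else 0  -- Python: assert(u >= 1) raises; excluded by Pre_
  else 0    -- Python: assert(B > 1) raises; excluded by Pre_

-- ===== PRECONDITION & SPEC =====
-- exactly the inputs passing Python A's asserts (assert B>1; assert u>=1)
def Pre_floor_log (u : Int) (B : Int) : Prop := 1 < B ∧ 1 ≤ u
instance (u : Int) (B : Int) : Decidable (Pre_floor_log u B) := by unfold Pre_floor_log; infer_instance
def pvWitness_floor_log : Int × Int := (100, 3)

def Spec_floor_log (u : Int) (B : Int) (out : Int) : Prop := out = floor_log_alt u B
instance (u : Int) (B : Int) (out : Int) : Decidable (Spec_floor_log u B out) := by unfold Spec_floor_log; infer_instance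

-- ===== CLAIM (what is proved, stated in full; the proofs are below) =====
def Claim_equal_floor_log : Prop := ∀ (u : Int) (B : Int), Dom_floor_log u B → Pre_floor_log u B → Spec_floor_log u B (floor_log u B)

-- ===== LEMMAS AND PROOFS =====

-- k < B^k for B ≥ 2
lemma int_lt_pow (B : Int) (hB : 2 ≤ B) (k : Nat) : (k : Int) < B ^ k := by
  induction k with
  | zero => simp
  | succ k ih =>
    have hp : (0:Int) < B ^ k := pow_pos (by omega) k
    have : B ^ (k + 1) = B ^ k * B := pow_succ B k
    push_cast
    nlinarith

-- uniqueness of the floor logarithm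
lemma log_uniq (B u : Int) (hB : 2 ≤ B) (m n : Nat)
    (h1 : B ^ m ≤ u) (h2 : u < B ^ (m + 1)) (h3 : B ^ n ≤ u) (h4 : u < B ^ (n + 1)) :
    m = n := by
  by_contra hne
  have hB1 : (1:Int) ≤ B := by omega
  rcases Nat.lt_or_ge m n with h | h
  · have : B ^ (m + 1) ≤ B ^ n := pow_le_pow_right₀ hB1 (by omega)
    omega
  · have hmn : n < m := by omega
    have : B ^ (n + 1) ≤ B ^ m := pow_le_pow_right₀ hB1 (by omega)
    omega

lemma bLoop_spec (u B : Int) (hB : 2 ≤ B) (hu : 1 ≤ u) :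
    ∀ d k : Nat, u.toNat ≤ k + d → B ^ k ≤ u →
    ∃ m : Nat, bLoop u B (k : Int) (B ^ (k + 1)) = (m : Int) ∧ B ^ m ≤ u ∧ u < B ^ (m + 1) := by
  intro d
  induction d with
  | zero =>
    intro k hd hk
    exfalso
    have := int_lt_pow B hB k
    omega
  | succ d ih =>
    intro k hd hk
    rw [bLoop]
    by_cases hle : B ^ (k + 1) ≤ u
    · have hcond : 2 ≤ B ∧ 1 ≤ B ^ (k + 1) ∧ B ^ (k + 1) ≤ u :=
        ⟨hB, one_le_pow₀ (by omega), hle⟩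
      rw [dif_pos hcond]
      have hklt := int_lt_pow B hB (k + 1)
      obtain ⟨m, hm, h1, h2⟩ := ih (k + 1) (by push_cast at hklt ⊢; omega) hle
      refine ⟨m, ?_, h1, h2⟩
      have hcast : ((k : Int) + 1) = ((k + 1 : Nat) : Int) := by push_cast; ring
      have hpow : B ^ (k + 1) * B = B ^ (k + 1 + 1) := (pow_succ B (k + 1)).symm
      rw [hcast, hpow]
      exact hm
    · have hcond : ¬ (2 ≤ B ∧ 1 ≤ B ^ (k + 1) ∧ B ^ (k + 1) ≤ u) := by
        intro h; exact hle h.2.2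
      rw [dif_neg hcond]
      exact ⟨k, rfl, hk, by omega⟩

-- B-side: floor_log_alt returns the floor logarithm
lemma alt_bounds (u B : Int) (hB : 1 < B) (hu : 1 ≤ u) :
    ∃ m : Nat, floor_log_alt u B = (m : Int) ∧ B ^ m ≤ u ∧ u < B ^ (m + 1) := by
  have h := bLoop_spec u B (by omega) hu u.toNat 0 (by omega) (by simp; omega)
  simpa [floor_log_alt, hB, hu] using h

-- A-side, phase 1: the table is [B^(2^0), …, B^(2^(n-1))] and u < B^(2^n)
lemma aGrow_spec (u B : Int) (hB : 2 ≤ B) :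
    ∀ d (j : Nat) (acc : List Int), (u + 1 - B ^ (2 ^ j)).toNat ≤ d →
    ∃ k : Nat,
      aGrow u (B ^ (2 ^ j)) acc
        = (acc ++ (List.range' j k).map (fun i => B ^ (2 ^ i)), B ^ (2 ^ (j + k)))
      ∧ u < B ^ (2 ^ (j + k)) := by
  intro d
  induction d with
  | zero =>
    intro j acc hd
    have hle : ¬ B ^ (2 ^ j) ≤ u := by omega
    rw [aGrow, dif_neg (by intro h; exact hle h.2)]
    exact ⟨0, by simp, by rw [Nat.add_zero]; omega⟩
  | succ d ih =>
    intro j acc hd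
    by_cases hle : B ^ (2 ^ j) ≤ u
    · have h2B : (2:Int) ≤ B ^ (2 ^ j) :=
        le_trans hB (le_self_pow₀ (by omega) (Nat.two_pow_pos j).ne')
      rw [aGrow, dif_pos ⟨h2B, hle⟩]
      have hsq : B ^ (2 ^ j) * B ^ (2 ^ j) = B ^ (2 ^ (j + 1)) := by
        rw [← pow_add]; ring_nf
      have hlt : B ^ (2 ^ j) < B ^ (2 ^ (j + 1)) := by nlinarith
      obtain ⟨k, hk, hk2⟩ := ih (j + 1) (acc ++ [B ^ (2 ^ j)]) (by omega)
      rw [hsq]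
      refine ⟨k + 1, ?_, by rw [show j + (k+1) = (j+1) + k by omega]; exact hk2⟩
      rw [hk, List.append_assoc, show j + (k+1) = (j+1) + k by omega,
        List.range'_succ]
      simp
    · rw [aGrow, dif_neg (by intro h; exact hle h.2)]
      exact ⟨0, by simp, by rw [Nat.add_zero]; omega⟩

-- A-side, phase 2: the descent keeps q = u // B^P with 1 ≤ q, ending with q < B
lemma aDescend_spec (u B : Int) (hB : 2 ≤ B) (n : Nat)
    (L : List Int) (hL : L = (List.range n).map (fun i => B ^ (2 ^ i))) :
    ∀ j : Nat, j ≤ n → ∀ (P : Nat) (q : Int), 1 ≤ q → q = u / B ^ P → q < B ^ (2 ^ j) →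
    ∃ (P' : Nat) (q' : Int),
      (PySem.List.pyRange ((j : Int) - 1) (-1) (-1)).foldl (aStep L) ((P : Int), q) = ((P' : Int), q')
      ∧ 1 ≤ q' ∧ q' = u / B ^ P' ∧ q' < B := by
  intro j
  induction j with
  | zero =>
    intro _ P q hq1 hq2 hq3
    rw [PySem.List.pyRange_neg_one_eq_nil (by omega)]
    exact ⟨P, q, rfl, hq1, hq2, by simpa using hq3⟩
  | succ j ih =>
    intro hjn P q hq1 hq2 hq3
    have hj : ((j + 1 : Nat) : Int) - 1 = (j : Nat) := by push_cast; ring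
    rw [hj, PySem.List.pyRange_neg_one_cons (by omega)]
    rw [List.foldl_cons]
    have hjlen : j < L.length := by simp [hL]; omega
    have hLj : PySem.List.pyGetD L ((j : Nat) : Int) 0 = B ^ (2 ^ j) := by
      rw [PySem.List.pyGetD_natCast, hL]
      rw [List.getD_eq_getElem _ _ (by simpa using hjn)]
      simp
    have hBj : (0:Int) < B ^ (2 ^ j) := pow_pos (by omega) _
    unfold aStep
    rw [hLj]
    by_cases hle : B ^ (2 ^ j) ≤ q
    · rw [if_pos hle]
      have hfd : PySem.Int.floordiv q (B ^ (2 ^ j)) = q / B ^ (2 ^ j) :=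
        PySem.Int.floordiv_eq_ediv_of_pos hBj
      have htn : ((j : Nat) : Int).toNat = j := by simp
      have hq' : q / B ^ (2 ^ j) = u / B ^ (P + 2 ^ j) := by
        have hBP : (0:Int) ≤ B ^ P := le_of_lt (pow_pos (by omega) _)
        rw [hq2, Int.ediv_ediv_of_nonneg hBP, ← pow_add]
      have hq'1 : 1 ≤ q / B ^ (2 ^ j) := by
        rw [Int.le_ediv_iff_mul_le hBj]; omega
      have hq'lt : q / B ^ (2 ^ j) < B ^ (2 ^ j) := by
        rw [Int.ediv_lt_iff_lt_mul hBj]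
        calc q < B ^ (2 ^ (j + 1)) := hq3
        _ = B ^ (2 ^ j) * B ^ (2 ^ j) := by rw [← pow_add]; ring_nf
      have := ih (by omega) (P + 2 ^ j) (q / B ^ (2 ^ j)) hq'1 hq' hq'lt
      simp only [hfd, htn]
      have hcast : ((P : Int) + 2 ^ j) = ((P + 2 ^ j : Nat) : Int) := by push_cast; ring
      rw [hcast]
      exact this
    · rw [if_neg hle]
      exact ih (by omega) P q hq1 hq2 (by omega)

-- A-side: floor_log returns the floor logarithm
lemma a_bounds (u B : Int) (hB : 1 < B) (hu : 1 ≤ u) :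
    ∃ m : Nat, floor_log u B = (m : Int) ∧ B ^ m ≤ u ∧ u < B ^ (m + 1) := by
  have hB2 : (2:Int) ≤ B := by omega
  obtain ⟨n, hgrow, hlt⟩ := aGrow_spec u B hB2 (u + 1 - B).toNat 0 [] (by norm_num)
  simp only [pow_zero, pow_one, zero_add] at hgrow hlt
  have hL : (aGrow u B []).1 = (List.range n).map (fun i => B ^ (2 ^ i)) := by
    rw [hgrow, List.range_eq_range']; simp
  have hlen : (aGrow u B []).1.length = n := by rw [hL]; simp
  obtain ⟨P', q', hfold, hq1, hq2, hq3⟩ :=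
    aDescend_spec u B hB2 n (aGrow u B []).1 hL n (le_refl n) 0 u hu (by simp) hlt
  refine ⟨P', ?_, ?_, ?_⟩
  · simp only [floor_log, if_pos hB, if_pos hu, hlen]
    have h0 : ((0:Int), u) = (((0:Nat):Int), u) := by norm_num
    rw [h0, hfold]
  · have hBP : (0:Int) < B ^ P' := pow_pos (by omega) _
    have := (Int.le_ediv_iff_mul_le hBP).mp (hq2 ▸ hq1)
    omega
  · have hBP : (0:Int) < B ^ P' := pow_pos (by omega) _
    have := (Int.ediv_lt_iff_lt_mul hBP).mp (hq2 ▸ hq3)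
    rw [pow_succ]
    nlinarith

-- ===== VERDICT (by name: the statement is the Claim_ definition above) =====
theorem floor_log_spec : Claim_equal_floor_log := by
  intro u B _ hpre
  obtain ⟨hB, hu⟩ := hpre
  obtain ⟨m, hm, hm1, hm2⟩ := a_bounds u B hB hu
  obtain ⟨m', hm', hm1', hm2'⟩ := alt_bounds u B hB hu
  have : m = m' := log_uniq B u (by omega) m m' hm1 hm2 hm1' hm2'
  unfold Spec_floor_log
  rw [hm, hm', this]
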